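-- pv_equiv track=rewrite | github.com/xuedong/hacker-rank | Tutorials/Interview Preparation Kit/Stacks and Queues/Min Max Riddle/min_max_riddle.py | create_dict
-- ===== SOURCE A (Python) =====
-- from collections import defaultdict
--
-- def create_dict(arr):
--     len_dict = defaultdict(int)
--     stack = []
--
--     i = 0
--     while i < len(arr):
--         if not stack or arr[stack[-1]] <= arr[i]:
--             stack.append(i)
--             i += 1
--         else:
--             top = stack.pop()
--             len_dict[arr[top]] = max(len_dict[arr[top]], i-stack[-1]-1 if stack else i)
--
--     while stack:
--         top = stack.pop()
--         len_dict[arr[top]] = max(len_dict[arr[top]], i-stack[-1]-1 if stack else i)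
--
--     return len_dict
-- ===== SOURCE B (Python) =====
-- from collections import defaultdict
--
-- def create_dict(arr):
--     # Monotonic stack of (value, width) pairs: each entry carries the width of
--     # the block it is the minimum of so far; widths accumulate on pops.
--     len_dict = defaultdict(int)
--     stack = []
--     for v in arr:
--         w = 0
--         while stack and stack[-1][0] > v:
--             pv, pw = stack.pop()
--             w += pw
--             len_dict[pv] = max(len_dict[pv], w)
--         stack.append((v, w + 1))
--     w = 0
--     while stack:
--         pv, pw = stack.pop()
--         w += pw
--         len_dict[pv] = max(len_dict[pv], w)
--     return len_dict
-- ===== Notes on version B (the rewrite author's own statement) =====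
-- stated objective: alternative
-- what changed: A runs an index-based monotonic stack with manual loop-index control (re-examining the current index after each pop) and computes each block width by subtracting stack indices into the array; B folds over the values themselves with a stack of (value, width) pairs, accumulating widths as entries are popped, so it never touches indices or re-reads the array.
import Mathlib
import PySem

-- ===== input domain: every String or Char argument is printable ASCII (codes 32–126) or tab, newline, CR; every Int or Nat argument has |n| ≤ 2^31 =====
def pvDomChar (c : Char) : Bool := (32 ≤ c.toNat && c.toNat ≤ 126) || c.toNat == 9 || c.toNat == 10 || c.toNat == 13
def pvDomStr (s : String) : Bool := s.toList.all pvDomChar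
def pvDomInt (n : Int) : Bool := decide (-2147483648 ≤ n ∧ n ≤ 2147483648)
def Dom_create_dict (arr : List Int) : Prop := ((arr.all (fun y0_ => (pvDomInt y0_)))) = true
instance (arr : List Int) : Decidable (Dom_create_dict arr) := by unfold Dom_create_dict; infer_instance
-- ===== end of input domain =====

-- B replaces A's index stack (with manual loop-index control and repeated arr
-- re-indexing) by a fold over the values themselves carrying a stack of
-- (value, width) pairs whose widths accumulate on pops; same return value
-- (alternative decomposition, not claimed faster).

-- ===== PORT A =====
-- helper: in-range list indexing (every index A uses is in range)
def pvGet (arr : List Int) (i : Int) : Int := PySem.List.pyGetD arr i 0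

-- `len_dict[arr[top]] = max(len_dict[arr[top]], w)` on a defaultdict(int)
def pvUpd (arr : List Int) (d : PySem.Dict Int Int) (top w : Int) : PySem.Dict Int Int :=
  d.insert (pvGet arr top) (max (d.getD (pvGet arr top) 0) w)

-- A's first while-loop; the stack is kept top-first (append/pop at the head)
def aLoop1 (arr : List Int) (n i : Int) (stack : List Int) (d : PySem.Dict Int Int) :
    List Int × PySem.Dict Int Int :=
  if _h : i < n then
    match stack with
    | [] => aLoop1 arr n (i + 1) [i] d
    | top :: rest =>
      if pvGet arr top ≤ pvGet arr i then
        aLoop1 arr n (i + 1) (i :: top :: rest) d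
      else
        aLoop1 arr n i rest
          (pvUpd arr d top (match rest with | [] => i | b :: _ => i - b - 1))
  else (stack, d)
termination_by (2 * (n - i)).toNat + stack.length
decreasing_by all_goals (simp only [List.length_cons, List.length_nil]; omega)

-- A's drain loop (the loop variable i equals len(arr) there)
def aLoop2 (arr : List Int) (i : Int) (stack : List Int) (d : PySem.Dict Int Int) :
    PySem.Dict Int Int :=
  match stack with
  | [] => d
  | top :: rest =>
      aLoop2 arr i rest (pvUpd arr d top (match rest with | [] => i | b :: _ => i - b - 1))

def create_dict (arr : List Int) : List (Int × Int) :=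
  let n : Int := arr.length
  let r := aLoop1 arr n 0 [] PySem.Dict.empty
  (aLoop2 arr n r.1 r.2).items

-- ===== PORT B =====
-- B's inner `while stack and stack[-1][0] > v` loop: pop (pv, pw), accumulate
-- the width, update the dict; stack kept top-first
def bPops (v : Int) (stack : List (Int × Int)) (w : Int) (d : PySem.Dict Int Int) :
    List (Int × Int) × Int × PySem.Dict Int Int :=
  match stack with
  | [] => ([], w, d)
  | (pv, pw) :: rest =>
      if v < pv then
        bPops v rest (w + pw) (d.insert pv (max (d.getD pv 0) (w + pw)))
      else ((pv, pw) :: rest, w, d)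

-- one iteration of B's `for v in arr` loop
def bStep (st : List (Int × Int) × PySem.Dict Int Int) (v : Int) :
    List (Int × Int) × PySem.Dict Int Int :=
  let r := bPops v st.1 0 st.2
  ((v, r.2.1 + 1) :: r.1, r.2.2)

-- B's final `while stack` drain loop
def bDrain (stack : List (Int × Int)) (w : Int) (d : PySem.Dict Int Int) :
    PySem.Dict Int Int :=
  match stack with
  | [] => d
  | (pv, pw) :: rest => bDrain rest (w + pw) (d.insert pv (max (d.getD pv 0) (w + pw)))

def create_dict_alt (arr : List Int) : List (Int × Int) :=
  let r := arr.foldl bStep ([], PySem.Dict.empty)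
  (bDrain r.1 0 r.2).items

-- ===== PRECONDITION & SPEC =====
def Spec_create_dict (arr : List Int) (out : List (Int × Int)) : Prop := out = create_dict_alt arr
instance (arr : List Int) (out : List (Int × Int)) : Decidable (Spec_create_dict arr out) := by unfold Spec_create_dict; infer_instance

-- ===== CLAIM (what is proved, stated in full; the proofs are below) =====
def Claim_equal_create_dict : Prop := ∀ (arr : List Int), Dom_create_dict arr → Spec_create_dict arr (create_dict arr)

-- ===== LEMMAS AND PROOFS =====

-- index of the top entry below the current one (-1 for an empty stack)
def headIdx : List Int → Int
  | [] => -1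
  | j :: _ => j

-- B's stack as a function of A's index stack: each index becomes its value
-- paired with its gap to the entry below it
def mapW (arr : List Int) : List Int → List (Int × Int)
  | [] => []
  | j :: rest => (pvGet arr j, j - headIdx rest) :: mapW arr rest

-- one round of pops: A's pop phase at index i and B's inner while loop pop the
-- same entries and perform the same dict updates
lemma pops_sim (arr : List Int) (n i : Int) (hi : i < n) :
    ∀ (sA : List Int) (d : PySem.Dict Int Int),
      ∃ sA' d', aLoop1 arr n i sA d = aLoop1 arr n (i + 1) (i :: sA') d' ∧
        bPops (pvGet arr i) (mapW arr sA) (i - 1 - headIdx sA) d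
          = (mapW arr sA', i - 1 - headIdx sA', d') := by
  intro sA
  induction sA with
  | nil =>
    intro d
    refine ⟨[], d, ?_, ?_⟩
    · rw [aLoop1.eq_def]; simp [hi]
    · rfl
  | cons j rest ih =>
    intro d
    by_cases hle : pvGet arr j ≤ pvGet arr i
    · refine ⟨j :: rest, d, ?_, ?_⟩
      · conv_lhs => rw [aLoop1.eq_def]
        simp [hi, hle]
      · show bPops (pvGet arr i) ((pvGet arr j, j - headIdx rest) :: mapW arr rest) _ d = _
        rw [bPops]
        rw [if_neg (by omega)]
        rfl
    · obtain ⟨sA', d', hA, hB⟩ := ih (pvUpd arr d j (i - 1 - headIdx rest))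
      refine ⟨sA', d', ?_, ?_⟩
      · conv_lhs => rw [aLoop1.eq_def]
        simp only [dif_pos hi]
        rw [if_neg hle]
        refine Eq.trans ?_ hA
        clear hA hB ih
        congr 2
        cases rest with
        | nil => show i = i - 1 - (-1); omega
        | cons b l => show i - b - 1 = i - 1 - b; omega
      · show bPops (pvGet arr i) ((pvGet arr j, j - headIdx rest) :: mapW arr rest) _ d = _
        rw [bPops]
        rw [if_pos (by omega)]
        have hw : i - 1 - headIdx (j :: rest) + (j - headIdx rest) = i - 1 - headIdx rest := by
          show i - 1 - j + (j - headIdx rest) = _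
          omega
        rw [hw]
        exact hB

-- the whole scan: A's main loop and B's fold over the remaining values reach
-- related states (top of A's stack is i - 1, captured by the width invariant)
lemma run_sim (arr : List Int) :
    ∀ (m : Nat) (i : Int) (sA : List Int) (d : PySem.Dict Int Int),
      0 ≤ i → i + m = (arr.length : Int) → i - 1 - headIdx sA = 0 →
      ∃ sF dF, aLoop1 arr (arr.length : Int) i sA d = (sF, dF) ∧
        (arr.drop i.toNat).foldl bStep (mapW arr sA, d) = (mapW arr sF, dF) ∧
        (arr.length : Int) - 1 - headIdx sF = 0 := by
  intro m
  induction m with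
  | zero =>
    intro i sA d h0 him hinv
    have hi : i = (arr.length : Int) := by omega
    refine ⟨sA, d, ?_, ?_, by omega⟩
    · rw [aLoop1.eq_def]
      rw [dif_neg (by omega)]
    · have hnil : arr.drop i.toNat = [] := List.drop_eq_nil_of_le (by omega)
      rw [hnil, List.foldl_nil]
  | succ m ih =>
    intro i sA d h0 him hinv
    have hi : i < (arr.length : Int) := by omega
    obtain ⟨sA', d', hA, hB⟩ := pops_sim arr (arr.length : Int) i hi sA d
    have hlt : i.toNat < arr.length := by omega
    have hdrop : arr.drop i.toNat = arr[i.toNat] :: arr.drop (i.toNat + 1) :=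
      List.drop_eq_getElem_cons hlt
    have hget : pvGet arr i = arr[i.toNat]'hlt := by
      unfold pvGet
      apply PySem.List.pyGetD_eq_getElem <;> omega
    obtain ⟨sF, dF, hA2, hB2, hF⟩ := ih (i + 1) (i :: sA') d' (by omega) (by omega)
      (by show i + 1 - 1 - i = 0; omega)
    refine ⟨sF, dF, ?_, ?_, hF⟩
    · rw [hA, hA2]
    · rw [hdrop, List.foldl_cons, ← hget]
      have hstep : bStep (mapW arr sA, d) (pvGet arr i) = (mapW arr (i :: sA'), d') := by
        unfold bStep
        rw [hinv] at hB
        simp only [hB]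
        show ((pvGet arr i, i - 1 - headIdx sA' + 1) :: mapW arr sA', d') = _
        rw [mapW]
        have h1 : i - 1 - headIdx sA' + 1 = i - headIdx sA' := by omega
        rw [h1]
      rw [hstep]
      rw [show i.toNat + 1 = (i + 1).toNat by omega]
      exact hB2

-- the drain loops match under the same width invariant (loop variable = n)
lemma drain_sim (arr : List Int) (n : Int) :
    ∀ (sA : List Int) (w : Int) (d : PySem.Dict Int Int), w = n - 1 - headIdx sA →
      bDrain (mapW arr sA) w d = aLoop2 arr n sA d := by
  intro sA
  induction sA with
  | nil => intro w d _; rfl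
  | cons j rest ih =>
    intro w d hw
    have hw2 : w + (j - headIdx rest) = n - 1 - headIdx rest := by
      have hj : headIdx (j :: rest) = j := rfl
      omega
    simp only [mapW, bDrain]
    rw [ih _ _ hw2, hw2]
    simp only [aLoop2]
    clear ih hw
    congr 1
    unfold pvUpd
    congr 2
    cases rest with
    | nil => show n - 1 - (-1) = n; omega
    | cons b l => show n - 1 - b = n - b - 1; omega

-- ===== VERDICT (by name: the statement is the Claim_ definition above) =====
theorem create_dict_spec : Claim_equal_create_dict := by
  intro arr _
  unfold Spec_create_dict create_dict create_dict_alt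
  obtain ⟨sF, dF, hA, hB, hF⟩ := run_sim arr arr.length 0 [] PySem.Dict.empty (le_refl 0)
    (by omega) (by rfl)
  simp only [hA]
  rw [show (0 : Int).toNat = 0 from rfl, List.drop_zero] at hB
  show _ = (bDrain (arr.foldl bStep ([], PySem.Dict.empty)).1 0
      (arr.foldl bStep ([], PySem.Dict.empty)).2).items
  rw [show (([], PySem.Dict.empty) : List (Int × Int) × PySem.Dict Int Int)
      = (mapW arr [], PySem.Dict.empty) from rfl, hB]
  rw [show (0 : Int) = (arr.length : Int) - 1 - headIdx sF by omega]
  rw [drain_sim arr (arr.length : Int) sF _ dF rfl]
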